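-- pv_equiv track=rewrite | github.com/Blues-berry/SF3D_learn | legacy_paper_diagnostic/scripts/build_material_refine_longrun_manifest.py | canonical_material_family
-- ===== SOURCE A (Python) =====
-- from typing import Any
--
-- def canonical_material_family(value: Any) -> str:
--     text = str(value or "").strip().lower().replace("-", "_").replace(" ", "_")
--     if not text or text in {"none", "null", "unknown", "pending_abo_semantic_classification"}:
--         return ""
--     aliases = {
--         "metal": "metal_dominant",
--         "metallic": "metal_dominant",
--         "metal_dominant": "metal_dominant",
--         "ceramic": "ceramic_glazed_lacquer",
--         "ceramic_glazed": "ceramic_glazed_lacquer",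
--         "glazed": "ceramic_glazed_lacquer",
--         "lacquer": "ceramic_glazed_lacquer",
--         "glass": "glass_metal",
--         "glass_metal": "glass_metal",
--         "mixed": "mixed_thin_boundary",
--         "mixed_thin_boundary": "mixed_thin_boundary",
--         "thin_boundary": "mixed_thin_boundary",
--         "glossy": "glossy_non_metal",
--         "glossy_non_metal": "glossy_non_metal",
--         "nonmetal": "glossy_non_metal",
--     }
--     if text in aliases:
--         return aliases[text]
--     if "glass" in text:
--         return "glass_metal"
--     if any(token in text for token in ("ceramic", "glazed", "lacquer", "porcelain", "marble")):
--         return "ceramic_glazed_lacquer"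
--     if any(token in text for token in ("metal", "metallic", "chrome", "steel", "brass", "copper", "aluminum", "aluminium")):
--         return "metal_dominant"
--     if any(token in text for token in ("thin", "boundary", "mixed", "frame", "wire", "lamp", "lighting")):
--         return "mixed_thin_boundary"
--     if any(token in text for token in ("gloss", "plastic", "leather", "wood", "paint")):
--         return "glossy_non_metal"
--     return ""
-- ===== SOURCE B (Python) =====
-- from typing import Any
--
-- _SENTINELS = {"none", "null", "unknown", "pending_abo_semantic_classification"}
--
-- _ALIASES = {
--     "metal": "metal_dominant",
--     "metallic": "metal_dominant",
--     "metal_dominant": "metal_dominant",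
--     "ceramic": "ceramic_glazed_lacquer",
--     "ceramic_glazed": "ceramic_glazed_lacquer",
--     "glazed": "ceramic_glazed_lacquer",
--     "lacquer": "ceramic_glazed_lacquer",
--     "glass": "glass_metal",
--     "glass_metal": "glass_metal",
--     "mixed": "mixed_thin_boundary",
--     "mixed_thin_boundary": "mixed_thin_boundary",
--     "thin_boundary": "mixed_thin_boundary",
--     "glossy": "glossy_non_metal",
--     "glossy_non_metal": "glossy_non_metal",
--     "nonmetal": "glossy_non_metal",
-- }
--
-- _LABELS = [
--     "glass_metal",
--     "ceramic_glazed_lacquer",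
--     "metal_dominant",
--     "mixed_thin_boundary",
--     "glossy_non_metal",
-- ]
--
-- # flat token table: (token, priority of its family); lower priority wins
-- _TOKEN_PRIORITY = [
--     ("glass", 0),
--     ("ceramic", 1), ("glazed", 1), ("lacquer", 1), ("porcelain", 1), ("marble", 1),
--     ("metal", 2), ("metallic", 2), ("chrome", 2), ("steel", 2), ("brass", 2),
--     ("copper", 2), ("aluminum", 2), ("aluminium", 2),
--     ("thin", 3), ("boundary", 3), ("mixed", 3), ("frame", 3), ("wire", 3),
--     ("lamp", 3), ("lighting", 3),
--     ("gloss", 4), ("plastic", 4), ("leather", 4), ("wood", 4), ("paint", 4),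
-- ]
--
--
-- def canonical_material_family(value: Any) -> str:
--     text = str(value or "").strip().lower().replace("-", "_").replace(" ", "_")
--     if not text or text in _SENTINELS:
--         return ""
--     hit = _ALIASES.get(text)
--     if hit is not None:
--         return hit
--     best = min((pri for token, pri in _TOKEN_PRIORITY if token in text), default=None)
--     return _LABELS[best] if best is not None else ""
-- ===== Notes on version B (the rewrite author's own statement) =====
-- stated objective: alternative
-- what changed: Instead of an ordered early-return cascade of per-family any()-substring checks, B scans one flat token table of (token, family-priority) pairs, takes the minimum priority among tokens occurring in the text, and indexes a label array; the guarded dict subscript becomes a single get.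
import Mathlib
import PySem

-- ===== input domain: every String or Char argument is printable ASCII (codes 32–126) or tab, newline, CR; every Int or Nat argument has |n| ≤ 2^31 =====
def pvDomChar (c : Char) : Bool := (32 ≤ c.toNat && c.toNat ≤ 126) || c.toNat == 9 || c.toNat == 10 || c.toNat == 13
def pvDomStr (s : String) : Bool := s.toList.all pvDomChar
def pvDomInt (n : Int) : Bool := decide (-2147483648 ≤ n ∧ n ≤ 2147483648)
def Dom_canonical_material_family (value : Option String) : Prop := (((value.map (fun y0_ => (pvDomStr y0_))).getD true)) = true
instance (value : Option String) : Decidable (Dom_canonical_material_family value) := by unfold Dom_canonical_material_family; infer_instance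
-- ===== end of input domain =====

set_option maxHeartbeats 2000000


-- B replaces A's ordered early-return cascade of per-family substring checks by a minimum-
-- priority selection over one flat (token, priority) table plus a label array; objective:
-- alternative (same cost, different algorithm).

-- ===== PORT A =====
def canonical_material_family (value : Option String) : String :=
  let text := PySem.Str.replace (PySem.Str.replace (PySem.Str.lower (PySem.Str.strip (value.getD ""))) "-" "_") " " "_"
  if text == "" || ["none", "null", "unknown", "pending_abo_semantic_classification"].contains text then ""
  else
    let aliases : PySem.Dict String String := PySem.Dict.ofList
      [("metal", "metal_dominant"), ("metallic", "metal_dominant"), ("metal_dominant", "metal_dominant"),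
       ("ceramic", "ceramic_glazed_lacquer"), ("ceramic_glazed", "ceramic_glazed_lacquer"),
       ("glazed", "ceramic_glazed_lacquer"), ("lacquer", "ceramic_glazed_lacquer"),
       ("glass", "glass_metal"), ("glass_metal", "glass_metal"),
       ("mixed", "mixed_thin_boundary"), ("mixed_thin_boundary", "mixed_thin_boundary"),
       ("thin_boundary", "mixed_thin_boundary"),
       ("glossy", "glossy_non_metal"), ("glossy_non_metal", "glossy_non_metal"), ("nonmetal", "glossy_non_metal")]
    if aliases.contains text then (aliases.get? text).getD ""
    else if PySem.Str.isIn "glass" text then "glass_metal"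
    else if ["ceramic", "glazed", "lacquer", "porcelain", "marble"].any (fun token => PySem.Str.isIn token text) then
      "ceramic_glazed_lacquer"
    else if ["metal", "metallic", "chrome", "steel", "brass", "copper", "aluminum", "aluminium"].any
        (fun token => PySem.Str.isIn token text) then "metal_dominant"
    else if ["thin", "boundary", "mixed", "frame", "wire", "lamp", "lighting"].any
        (fun token => PySem.Str.isIn token text) then "mixed_thin_boundary"
    else if ["gloss", "plastic", "leather", "wood", "paint"].any (fun token => PySem.Str.isIn token text) then
      "glossy_non_metal"
    else ""

-- ===== PORT B =====
def pvSentinels : List String := ["none", "null", "unknown", "pending_abo_semantic_classification"]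

def pvAliases : PySem.Dict String String := PySem.Dict.ofList
  [("metal", "metal_dominant"), ("metallic", "metal_dominant"), ("metal_dominant", "metal_dominant"),
   ("ceramic", "ceramic_glazed_lacquer"), ("ceramic_glazed", "ceramic_glazed_lacquer"),
   ("glazed", "ceramic_glazed_lacquer"), ("lacquer", "ceramic_glazed_lacquer"),
   ("glass", "glass_metal"), ("glass_metal", "glass_metal"),
   ("mixed", "mixed_thin_boundary"), ("mixed_thin_boundary", "mixed_thin_boundary"),
   ("thin_boundary", "mixed_thin_boundary"),
   ("glossy", "glossy_non_metal"), ("glossy_non_metal", "glossy_non_metal"), ("nonmetal", "glossy_non_metal")]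

def pvLabels : List String :=
  ["glass_metal", "ceramic_glazed_lacquer", "metal_dominant", "mixed_thin_boundary", "glossy_non_metal"]

def pvTokenPriority : List (String × Nat) :=
  [("glass", 0),
   ("ceramic", 1), ("glazed", 1), ("lacquer", 1), ("porcelain", 1), ("marble", 1),
   ("metal", 2), ("metallic", 2), ("chrome", 2), ("steel", 2), ("brass", 2),
   ("copper", 2), ("aluminum", 2), ("aluminium", 2),
   ("thin", 3), ("boundary", 3), ("mixed", 3), ("frame", 3), ("wire", 3),
   ("lamp", 3), ("lighting", 3),
   ("gloss", 4), ("plastic", 4), ("leather", 4), ("wood", 4), ("paint", 4)]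

def canonical_material_family_alt (value : Option String) : String :=
  let text := PySem.Str.replace (PySem.Str.replace (PySem.Str.lower (PySem.Str.strip (value.getD ""))) "-" "_") " " "_"
  if text == "" || pvSentinels.contains text then ""
  else
    match pvAliases.get? text with
    | some hit => hit
    | none =>
      -- min((pri for token, pri in _TOKEN_PRIORITY if token in text), default=None)
      let best := (pvTokenPriority.filterMap
        (fun tp => if PySem.Str.isIn tp.1 text then some tp.2 else none)).min?
      match best with
      | some b => pvLabels.getD b ""   -- _LABELS[best]; best is always a valid index 0..4
      | none => ""

-- ===== PRECONDITION & SPEC =====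
def Spec_canonical_material_family (value : Option String) (out : String) : Prop := out = canonical_material_family_alt value
instance (value : Option String) (out : String) : Decidable (Spec_canonical_material_family value out) := by unfold Spec_canonical_material_family; infer_instance

-- ===== CLAIM =====
def Claim_equal_canonical_material_family : Prop := ∀ (value : Option String), Dom_canonical_material_family value → Spec_canonical_material_family value (canonical_material_family value)

-- ===== LEMMAS AND PROOFS =====

theorem pv_foldl_min_const (l : List Nat) (i : Nat) (h : ∀ x ∈ l, i ≤ x) : l.foldl min i = i := by
  induction l generalizing i with
  | nil => rfl
  | cons a l ih =>
    have hia : min i a = i := Nat.min_eq_left (h a (by simp))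
    simp only [List.foldl_cons, hia]
    exact ih i (fun x hx => h x (by simp [hx]))

theorem pv_min?_const_filterMap (ts : List String) (text : String) (i : Nat) :
    (ts.filterMap (fun t => if PySem.Str.isIn t text then some i else none)).min? =
      (if ts.any (fun t => PySem.Str.isIn t text) then some i else none) := by
  induction ts with
  | nil => rfl
  | cons t ts ih =>
    by_cases ht : PySem.Str.isIn t text = true
    · simp only [List.filterMap_cons, ht, if_pos, List.any_cons, Bool.true_or, List.min?_cons']
      congr 1
      apply pv_foldl_min_const
      intro x hx
      simp only [List.mem_filterMap] at hx
      obtain ⟨u, _, hu⟩ := hx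
      split at hu
      · cases hu; exact Nat.le_refl i
      · cases hu
    · simp only [List.filterMap_cons, ht, if_neg, Bool.false_eq_true, not_false_iff,
        List.any_cons, Bool.false_or, ih]

theorem pv_min?_append (a b : List Nat) :
    (a ++ b).min? = match a.min?, b.min? with
      | none, mb => mb
      | some x, none => some x
      | some x, some y => some (min x y) := by
  induction a with
  | nil => rcases hb : b.min? with _ | mb <;> simp [hb]
  | cons x a ih =>
    rcases ha : a.min? with _ | ma <;> rcases hb : b.min? with _ | mb <;>
      simp_all [List.cons_append, Nat.min_assoc]

theorem pv_best_eq (text : String) :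
    (match (pvTokenPriority.filterMap
        (fun tp => if PySem.Str.isIn tp.1 text then some tp.2 else none)).min? with
      | some b => pvLabels.getD b ""
      | none => "") =
    (if PySem.Str.isIn "glass" text then "glass_metal"
     else if ["ceramic", "glazed", "lacquer", "porcelain", "marble"].any (fun token => PySem.Str.isIn token text) then "ceramic_glazed_lacquer"
     else if ["metal", "metallic", "chrome", "steel", "brass", "copper", "aluminum", "aluminium"].any (fun token => PySem.Str.isIn token text) then "metal_dominant"
     else if ["thin", "boundary", "mixed", "frame", "wire", "lamp", "lighting"].any (fun token => PySem.Str.isIn token text) then "mixed_thin_boundary"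
     else if ["gloss", "plastic", "leather", "wood", "paint"].any (fun token => PySem.Str.isIn token text) then "glossy_non_metal"
     else "") := by
  rw [show pvTokenPriority =
      (["glass"].map (fun t => (t, 0))) ++
      ((["ceramic", "glazed", "lacquer", "porcelain", "marble"].map (fun t => (t, 1))) ++
      ((["metal", "metallic", "chrome", "steel", "brass", "copper", "aluminum", "aluminium"].map (fun t => (t, 2))) ++
      ((["thin", "boundary", "mixed", "frame", "wire", "lamp", "lighting"].map (fun t => (t, 3))) ++
       (["gloss", "plastic", "leather", "wood", "paint"].map (fun t => (t, 4)))))) from rfl]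
  simp only [List.filterMap_append, List.filterMap_map, Function.comp_def]
  rw [pv_min?_append, pv_min?_append, pv_min?_append, pv_min?_append,
      pv_min?_const_filterMap, pv_min?_const_filterMap, pv_min?_const_filterMap,
      pv_min?_const_filterMap, pv_min?_const_filterMap]
  by_cases h0 : (["glass"].any (fun t => PySem.Str.isIn t text)) = true <;>
  by_cases h1 : (["ceramic", "glazed", "lacquer", "porcelain", "marble"].any (fun t => PySem.Str.isIn t text)) = true <;>
  by_cases h2 : (["metal", "metallic", "chrome", "steel", "brass", "copper", "aluminum", "aluminium"].any (fun t => PySem.Str.isIn t text)) = true <;>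
  by_cases h3 : (["thin", "boundary", "mixed", "frame", "wire", "lamp", "lighting"].any (fun t => PySem.Str.isIn t text)) = true <;>
  by_cases h4 : (["gloss", "plastic", "leather", "wood", "paint"].any (fun t => PySem.Str.isIn t text)) = true <;>
  simp_all [pvLabels]

theorem pv_body (text : String) :
    (if text == "" || ["none", "null", "unknown", "pending_abo_semantic_classification"].contains text then ""
     else
      let aliases : PySem.Dict String String := PySem.Dict.ofList
        [("metal", "metal_dominant"), ("metallic", "metal_dominant"), ("metal_dominant", "metal_dominant"),
         ("ceramic", "ceramic_glazed_lacquer"), ("ceramic_glazed", "ceramic_glazed_lacquer"),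
         ("glazed", "ceramic_glazed_lacquer"), ("lacquer", "ceramic_glazed_lacquer"),
         ("glass", "glass_metal"), ("glass_metal", "glass_metal"),
         ("mixed", "mixed_thin_boundary"), ("mixed_thin_boundary", "mixed_thin_boundary"),
         ("thin_boundary", "mixed_thin_boundary"),
         ("glossy", "glossy_non_metal"), ("glossy_non_metal", "glossy_non_metal"), ("nonmetal", "glossy_non_metal")]
      if aliases.contains text then (aliases.get? text).getD ""
      else if PySem.Str.isIn "glass" text then "glass_metal"
      else if ["ceramic", "glazed", "lacquer", "porcelain", "marble"].any (fun token => PySem.Str.isIn token text) then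
        "ceramic_glazed_lacquer"
      else if ["metal", "metallic", "chrome", "steel", "brass", "copper", "aluminum", "aluminium"].any
          (fun token => PySem.Str.isIn token text) then "metal_dominant"
      else if ["thin", "boundary", "mixed", "frame", "wire", "lamp", "lighting"].any
          (fun token => PySem.Str.isIn token text) then "mixed_thin_boundary"
      else if ["gloss", "plastic", "leather", "wood", "paint"].any (fun token => PySem.Str.isIn token text) then
        "glossy_non_metal"
      else "") =
    (if text == "" || pvSentinels.contains text then ""
     else
      match pvAliases.get? text with
      | some hit => hit
      | none =>
        match (pvTokenPriority.filterMap
            (fun tp => if PySem.Str.isIn tp.1 text then some tp.2 else none)).min? with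
        | some b => pvLabels.getD b ""
        | none => "") := by
  by_cases hguard : (text == "" || pvSentinels.contains text) = true
  · rw [if_pos (by simpa [pvSentinels] using hguard), if_pos hguard]
  · rw [if_neg (by simpa [pvSentinels] using hguard), if_neg hguard]
    rcases h : pvAliases.get? text with _ | hit
    · have hc : pvAliases.contains text = false := by
        rw [PySem.Dict.contains_eq_isSome_get?, h]; rfl
      rw [show (PySem.Dict.ofList
        [("metal", "metal_dominant"), ("metallic", "metal_dominant"), ("metal_dominant", "metal_dominant"),
         ("ceramic", "ceramic_glazed_lacquer"), ("ceramic_glazed", "ceramic_glazed_lacquer"),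
         ("glazed", "ceramic_glazed_lacquer"), ("lacquer", "ceramic_glazed_lacquer"),
         ("glass", "glass_metal"), ("glass_metal", "glass_metal"),
         ("mixed", "mixed_thin_boundary"), ("mixed_thin_boundary", "mixed_thin_boundary"),
         ("thin_boundary", "mixed_thin_boundary"),
         ("glossy", "glossy_non_metal"), ("glossy_non_metal", "glossy_non_metal"),
         ("nonmetal", "glossy_non_metal")] : PySem.Dict String String) = pvAliases from rfl]
      rw [if_neg (by simp [hc])]
      exact (pv_best_eq text).symm
    · have hc : pvAliases.contains text = true := by
        rw [PySem.Dict.contains_eq_isSome_get?, h]; rfl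
      rw [show (PySem.Dict.ofList
        [("metal", "metal_dominant"), ("metallic", "metal_dominant"), ("metal_dominant", "metal_dominant"),
         ("ceramic", "ceramic_glazed_lacquer"), ("ceramic_glazed", "ceramic_glazed_lacquer"),
         ("glazed", "ceramic_glazed_lacquer"), ("lacquer", "ceramic_glazed_lacquer"),
         ("glass", "glass_metal"), ("glass_metal", "glass_metal"),
         ("mixed", "mixed_thin_boundary"), ("mixed_thin_boundary", "mixed_thin_boundary"),
         ("thin_boundary", "mixed_thin_boundary"),
         ("glossy", "glossy_non_metal"), ("glossy_non_metal", "glossy_non_metal"),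
         ("nonmetal", "glossy_non_metal")] : PySem.Dict String String) = pvAliases from rfl]
      rw [if_pos hc, h]
      rfl

-- ===== VERDICT =====
theorem canonical_material_family_spec : Claim_equal_canonical_material_family := by
  intro value _
  unfold Spec_canonical_material_family canonical_material_family canonical_material_family_alt
  generalize PySem.Str.replace (PySem.Str.replace (PySem.Str.lower (PySem.Str.strip (value.getD ""))) "-" "_") " " "_" = text
  exact pv_body text
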